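-- pv_equiv track=rewrite | github.com/MaayanWate/Secure-Gin-Rummy | backend/game.py | _best_deadwood_recursive
-- ===== SOURCE A (Python) =====
-- def card_points(rank):
--     """
--     Determines the points of a card based on its rank.
--     """
--     if rank == 1:
--         return 1
--     elif rank >= 11:
--         return 10
--     else:
--         return rank
--
-- def remove_cards(full_list, subset):
--     """
--     Removes a list of cards (subset) from the full list and returns the remaining cards.
--     """
--     remaining = list(full_list)
--     for card in subset:
--         remaining.remove(card)
--     return remaining
--
-- def _best_deadwood_recursive(card_list):
--     """
--     Recursively calculates the minimum deadwood value (the total value of ungrouped cards).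
--     It tries to group cards into valid sets (3 or 4 of the same rank) or runs (sequences of 3+ cards in the same suit).
--     """
--     if not card_list:
--         return 0
--     first = card_list[0]
--     rest = card_list[1:]
--     best_score = card_points(first[0]) + _best_deadwood_recursive(rest)
--
--     # Check for sets of the same rank (3 or 4 cards of the same rank)
--     same_rank = [c for c in card_list if c[0] == first[0]]
--     for group_size in [3, 4]:
--         if len(same_rank) >= group_size:
--             from itertools import combinations
--             for combo in combinations(same_rank, group_size):
--                 remaining = remove_cards(card_list, list(combo))
--                 score = _best_deadwood_recursive(remaining)
--                 if score < best_score: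
--                     best_score = score
--
--     # Check for runs (sequences of cards in the same suit)
--     run_suit = first[1]
--     same_suit = [c for c in card_list if c[1] == run_suit]
--     runs = find_all_runs(same_suit)
--     for run_group in runs:
--         if first in run_group:
--             remaining = remove_cards(card_list, run_group)
--             score = _best_deadwood_recursive(remaining)
--             if score < best_score:
--                 best_score = score
--
--     return best_score
--
-- def find_all_runs(cards_same_suit):
--     """
--     Finds all possible runs (sequences of 3 or more consecutive cards) within a given set of cards of the same suit.
--     """
--     if len(cards_same_suit) < 3:
--         return []
--     sorted_cards = sorted(cards_same_suit, key=lambda x: x[0])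
--     results = []
--     def backtrack(start, current):
--         if start >= len(sorted_cards):
--             if len(current) >= 3:
--                 results.append(current[:])
--             return
--         if not current or sorted_cards[start][0] == current[-1][0] + 1:
--             current.append(sorted_cards[start])
--             backtrack(start+1, current)
--             current.pop()
--         backtrack(start+1, current)
--     backtrack(0, [])
--     return [r for r in results if len(r) >= 3]
-- ===== SOURCE B (Python) =====
-- def _best_deadwood_recursive(card_list):
--     """
--     Minimum deadwood by sorting the hand once by rank and recursing on the
--     lowest card: it is either deadwood, melded into a set (pick 2 or 3 more
--     cards of its rank), or melded into a run (which, since it is the lowest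
--     rank in the hand, must extend strictly upward in its suit).
--     """
--     def points(r):
--         return 1 if r == 1 else 10 if r >= 11 else r
--
--     def pick_rank(k, r, xs):
--         # all ways to take k cards of rank r out of xs; returns remainders
--         if k == 0:
--             return [xs]
--         if not xs:
--             return []
--         x, rest = xs[0], xs[1:]
--         res = pick_rank(k - 1, r, rest) if x[0] == r else []
--         return res + [[x] + rem for rem in pick_rank(k, r, rest)]
--
--     def take_card(c, xs):
--         # remainder after removing the first occurrence of c, or None
--         for i, x in enumerate(xs):
--             if x == c:
--                 return xs[:i] + xs[i + 1:]
--         return None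
--
--     def solve(hand):  # hand is sorted by rank (ascending)
--         if not hand:
--             return 0
--         (r, s), rest = hand[0], hand[1:]
--         best = points(r) + solve(rest)
--         for k in (2, 3):
--             for rem in pick_rank(k, r, rest):
--                 v = solve(rem)
--                 if v < best:
--                     best = v
--         rem, nxt, length = rest, r + 1, 1
--         while True:
--             rem = take_card((nxt, s), rem)
--             if rem is None:
--                 break
--             nxt += 1
--             length += 1
--             if length >= 3:
--                 v = solve(rem)
--                 if v < best:
--                     best = v
--         return best
--
--     return solve(sorted(card_list, key=lambda c: c[0]))
-- ===== Notes on version B (the rewrite author's own statement) =====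
-- stated objective: faster
-- what changed: B sorts the hand once by rank and recurses on the lowest card, building only the melds that contain it (sets by picking 2-3 same-rank partners, runs by a deterministic upward chain of first occurrences), whereas A at every level enumerates all 3/4-combinations of the first card's rank (including ones not containing it) and backtracks over every run of the suit before filtering; both compute the exact minimum deadwood.
import Mathlib
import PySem

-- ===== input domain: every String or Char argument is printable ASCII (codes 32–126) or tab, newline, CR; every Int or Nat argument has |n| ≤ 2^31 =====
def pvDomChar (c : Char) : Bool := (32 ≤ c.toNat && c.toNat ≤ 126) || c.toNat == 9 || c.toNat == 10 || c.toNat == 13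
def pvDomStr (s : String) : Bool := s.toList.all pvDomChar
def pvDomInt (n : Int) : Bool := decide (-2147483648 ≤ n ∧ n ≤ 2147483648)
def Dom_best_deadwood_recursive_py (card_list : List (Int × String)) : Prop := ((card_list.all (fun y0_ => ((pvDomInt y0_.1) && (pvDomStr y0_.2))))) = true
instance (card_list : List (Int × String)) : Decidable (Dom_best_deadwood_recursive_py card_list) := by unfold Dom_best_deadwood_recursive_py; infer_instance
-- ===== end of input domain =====

-- B sorts the hand once and recurses on the lowest-ranked card, building only the melds
-- that contain it (sets by picking same-rank partners, runs by a deterministic upward chain),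
-- instead of A's per-level enumeration of all same-rank combinations and all runs of the suit.
-- Objective: faster (a much smaller search tree; measured on the timing inputs).

-- ===== PORT A =====
def pvCardPoints (rank : Int) : Int :=
  if rank = 1 then 1 else if 11 ≤ rank then 10 else rank

-- remove_cards: `.remove` removes the first occurrence; inside A the card is always present,
-- so the `getD` fallback (Python would raise ValueError) is never taken.
def pvRemoveCards (full_list subset : List (Int × String)) : List (Int × String) :=
  subset.foldl (fun remaining card => (PySem.List.remove? remaining card).getD remaining) full_list

-- itertools.combinations, in itertools order
def pvCombos : Nat → List (Int × String) → List (List (Int × String))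
  | 0, _ => [[]]
  | _ + 1, [] => []
  | k + 1, x :: xs => (pvCombos k xs).map (fun c => x :: c) ++ pvCombos (k + 1) xs

-- the inner `backtrack` of find_all_runs (pure rendering of the mutated `current`/`results`)
def pvBacktrack : List (Int × String) → List (Int × String) → List (List (Int × String))
  | [], current => if 3 ≤ current.length then [current] else []
  | x :: rest, current =>
      (if (match current.getLast? with
           | none => true
           | some c => decide (x.1 = c.1 + 1)) then
        pvBacktrack rest (current ++ [x])
      else []) ++ pvBacktrack rest current

def pvFindAllRuns (cards_same_suit : List (Int × String)) : List (List (Int × String)) :=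
  if cards_same_suit.length < 3 then []
  else
    (pvBacktrack (PySem.List.sorted cards_same_suit (fun c => c.1) false) []).filter
      (fun r => 3 ≤ r.length)

-- the `remaining` lists A recurses on, in the order its loops produce them
def pvBranchesA (first : Int × String) (rest : List (Int × String)) : List (List (Int × String)) :=
  let l := first :: rest
  let same_rank := l.filter (fun c => decide (c.1 = first.1))
  (if 3 ≤ same_rank.length then (pvCombos 3 same_rank).map (pvRemoveCards l) else [])
    ++ (if 4 ≤ same_rank.length then (pvCombos 4 same_rank).map (pvRemoveCards l) else [])
    ++ ((pvFindAllRuns (l.filter (fun c => decide (c.2 = first.2)))).filter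
          (fun run => decide (first ∈ run))).map (pvRemoveCards l)

-- termination fact for the port (self-contained: every branch recurses on a shorter list)
theorem pvBranchesA_lt (first : Int × String) (rest : List (Int × String)) :
    ∀ r ∈ pvBranchesA first rest, r.length < (first :: rest).length := by
  have hremle : ∀ (s l : List (Int × String)), (pvRemoveCards l s).length ≤ l.length := by
    intro s
    induction s with
    | nil => intro l; simp [pvRemoveCards]
    | cons c cs ih =>
        intro l
        show (pvRemoveCards ((PySem.List.remove? l c).getD l) cs).length ≤ l.length
        refine le_trans (ih _) ?_
        by_cases hc : c ∈ l
        · rw [PySem.List.remove?_eq_some_erase l c hc]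
          have := List.length_erase_of_mem hc
          simp [this]
        · rw [(PySem.List.remove?_eq_none_iff l c).2 hc]
          simp
  have hremlt : ∀ (s l : List (Int × String)), (∃ c ∈ s, c ∈ l) →
      (pvRemoveCards l s).length < l.length := by
    intro s
    induction s with
    | nil => intro l h; simp at h
    | cons c cs ih =>
        intro l h
        show (pvRemoveCards ((PySem.List.remove? l c).getD l) cs).length < l.length
        by_cases hc : c ∈ l
        · rw [PySem.List.remove?_eq_some_erase l c hc]
          have h1 := hremle cs (l.erase c)
          have h3 := List.length_erase_of_mem hc
          have h4 : 0 < l.length := List.length_pos_of_mem hc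
          simp only [Option.getD_some]
          omega
        · rw [(PySem.List.remove?_eq_none_iff l c).2 hc]
          rcases h with ⟨d, hd, hdl⟩
          rcases List.mem_cons.1 hd with rfl | hd
          · exact absurd hdl hc
          · exact ih _ ⟨d, hd, hdl⟩
  have hcombosub : ∀ (xs : List (Int × String)) (k : Nat) (c : List (Int × String)),
      c ∈ pvCombos k xs → c.length = k ∧ ∀ a ∈ c, a ∈ xs := by
    intro xs
    induction xs with
    | nil =>
        intro k c h
        cases k with
        | zero => simp [pvCombos] at h; simp [h]
        | succ k => simp [pvCombos] at h
    | cons x xs ih =>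
        intro k c h
        cases k with
        | zero => simp [pvCombos] at h; simp [h]
        | succ k =>
            simp only [pvCombos, List.mem_append, List.mem_map] at h
            rcases h with ⟨c', hc', rfl⟩ | h
            · obtain ⟨h1, h2⟩ := ih k c' hc'
              refine ⟨by simp [h1], ?_⟩
              intro a ha
              rcases List.mem_cons.1 ha with rfl | ha
              · simp
              · simp [h2 a ha]
            · obtain ⟨h1, h2⟩ := ih (k + 1) c h
              exact ⟨h1, fun a ha => by simp [h2 a ha]⟩
  intro r hr
  have hcombo : ∀ k, ∀ c ∈ pvCombos k ((first :: rest).filter (fun c => decide (c.1 = first.1))),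
      3 ≤ k → (pvRemoveCards (first :: rest) c).length < (first :: rest).length := by
    intro k c hc hk
    obtain ⟨hlen, hsub⟩ := hcombosub _ k c hc
    apply hremlt
    rcases c with _ | ⟨a, c⟩
    · simp at hlen; omega
    · refine ⟨a, by simp, ?_⟩
      have : a ∈ (first :: rest).filter (fun c => decide (c.1 = first.1)) := hsub a (by simp)
      exact (List.mem_filter.1 this).1
  rw [pvBranchesA] at hr
  rcases List.mem_append.1 hr with h12 | h
  swap
  case _ =>
    obtain ⟨run, hrun, rfl⟩ := List.mem_map.1 h
    have hfirst : first ∈ run := by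
      have := (List.mem_filter.1 hrun).2; simpa using this
    exact hremlt _ _ ⟨first, hfirst, by simp⟩
  rcases List.mem_append.1 h12 with h | h
  · split at h
    · obtain ⟨c, hc, rfl⟩ := List.mem_map.1 h; exact hcombo 3 c hc (by omega)
    · simp at h
  · split at h
    · obtain ⟨c, hc, rfl⟩ := List.mem_map.1 h; exact hcombo 4 c hc (by omega)
    · simp at h

def best_deadwood_recursive_py (card_list : List (Int × String)) : Int :=
  match card_list with
  | [] => 0
  | first :: rest =>
      (pvBranchesA first rest).attach.foldl
        (fun best_score r =>
          if best_deadwood_recursive_py r.1 < best_score then best_deadwood_recursive_py r.1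
          else best_score)
        (pvCardPoints first.1 + best_deadwood_recursive_py rest)
termination_by card_list.length
decreasing_by
  all_goals first
    | (have := pvBranchesA_lt first rest r.1 r.2; simp at this ⊢; omega)
    | simp

-- ===== PORT B =====
def pvPointsB (r : Int) : Int :=
  if r = 1 then 1 else if 11 ≤ r then 10 else r

-- all ways to take k cards of rank r out of xs, as the lists that remain
def pvPickRank : Nat → Int → List (Int × String) → List (List (Int × String))
  | 0, _, xs => [xs]
  | _ + 1, _, [] => []
  | k + 1, r, x :: rest =>
      (if x.1 = r then pvPickRank k r rest else [])
        ++ (pvPickRank (k + 1) r rest).map (fun rem => x :: rem)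

-- remainder after removing the first occurrence of c, or none
def pvTakeCard (c : Int × String) : List (Int × String) → Option (List (Int × String))
  | [] => none
  | x :: rest => if x = c then some rest else (pvTakeCard c rest).map (fun ys => x :: ys)

theorem pvTakeCard_length {c : Int × String} {xs ys : List (Int × String)}
    (h : pvTakeCard c xs = some ys) : ys.length + 1 = xs.length := by
  induction xs generalizing ys with
  | nil => simp [pvTakeCard] at h
  | cons x rest ih =>
      simp only [pvTakeCard] at h
      split at h
      · cases h; simp
      · rcases Option.map_eq_some_iff.1 h with ⟨ys', hy, rfl⟩
        have := ih hy; simp; omega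

-- the remainders produced by B's while loop over the upward run chain
def pvChain (s : String) (rem : List (Int × String)) (nxt : Int) (len : Nat) :
    List (List (Int × String)) :=
  match h : pvTakeCard (nxt, s) rem with
  | none => []
  | some rem2 =>
      (if 3 ≤ len + 1 then [rem2] else []) ++ pvChain s rem2 (nxt + 1) (len + 1)
termination_by rem.length
decreasing_by
  have := pvTakeCard_length h
  omega

def pvBranchesB (r : Int) (s : String) (rest : List (Int × String)) :
    List (List (Int × String)) :=
  pvPickRank 2 r rest ++ pvPickRank 3 r rest ++ pvChain s rest (r + 1) 1

-- termination fact for the port (self-contained)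
theorem pvBranchesB_lt (r : Int) (s : String) (rest : List (Int × String)) :
    ∀ rem ∈ pvBranchesB r s rest, rem.length < ((r, s) :: rest).length := by
  have hpick : ∀ (xs : List (Int × String)) (k : Nat) (rem : List (Int × String)),
      rem ∈ pvPickRank k r xs → rem.length + k = xs.length := by
    intro xs
    induction xs with
    | nil =>
        intro k rem h
        cases k with
        | zero => simp [pvPickRank] at h; simp [h]
        | succ k => simp [pvPickRank] at h
    | cons x rest' ih =>
        intro k rem h
        cases k with
        | zero => simp [pvPickRank] at h; simp [h]
        | succ k =>
            simp only [pvPickRank, List.mem_append, List.mem_map] at h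
            rcases h with h | ⟨rem', h, rfl⟩
            · split at h
              · have := ih k rem h; simp; omega
              · simp at h
            · have := ih (k + 1) rem' h; simp; omega
  have hchain : ∀ (n : Nat) (xs : List (Int × String)), xs.length ≤ n →
      ∀ (nxt : Int) (len : Nat) (r' : List (Int × String)),
      r' ∈ pvChain s xs nxt len → r'.length < xs.length := by
    intro n
    induction n with
    | zero =>
        intro xs hlen nxt len r' h
        rw [pvChain] at h
        split at h
        · simp at h
        · next rem2 htake =>
            have := pvTakeCard_length htake
            omega
    | succ n ih =>
        intro xs hlen nxt len r' h
        rw [pvChain] at h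
        split at h
        · simp at h
        · next rem2 htake =>
            have hlen2 := pvTakeCard_length htake
            rcases List.mem_append.1 h with h | h
            · split at h <;> simp at h
              subst h; omega
            · have := ih rem2 (by omega) (nxt + 1) (len + 1) r' h
              omega
  intro rem h
  rcases List.mem_append.1 h with h12 | h
  · rcases List.mem_append.1 h12 with h | h
    · have := hpick rest 2 rem h; simp; omega
    · have := hpick rest 3 rem h; simp; omega
  · have := hchain rest.length rest le_rfl (r + 1) 1 rem h; simp; omega

def pvSolveB : List (Int × String) → Int
  | [] => 0
  | (r, s) :: rest =>
      (pvBranchesB r s rest).attach.foldl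
        (fun best rem => if pvSolveB rem.1 < best then pvSolveB rem.1 else best)
        (pvPointsB r + pvSolveB rest)
termination_by hand => hand.length
decreasing_by
  all_goals first
    | (have := pvBranchesB_lt r s rest rem.1 rem.2; simp at this ⊢; omega)
    | simp

def best_deadwood_recursive_py_alt (card_list : List (Int × String)) : Int :=
  pvSolveB (PySem.List.sorted card_list (fun c => c.1) false)

-- ===== PRECONDITION & SPEC =====
def Spec_best_deadwood_recursive_py (card_list : List (Int × String)) (out : Int) : Prop := out = best_deadwood_recursive_py_alt card_list
instance (card_list : List (Int × String)) (out : Int) : Decidable (Spec_best_deadwood_recursive_py card_list out) := by unfold Spec_best_deadwood_recursive_py; infer_instance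

-- ===== CLAIM (what is proved, stated in full; the proofs are below) =====
def Claim_equal_best_deadwood_recursive_py : Prop := ∀ (card_list : List (Int × String)), Dom_best_deadwood_recursive_py card_list → Spec_best_deadwood_recursive_py card_list (best_deadwood_recursive_py card_list)

-- ===== LEMMAS AND PROOFS =====

-- ---- the common specification: achievable deadwood values over the multiset of cards ----
def pvPts (c : Int × String) : Int := pvCardPoints c.1

-- the ascending run r, r+1, …, r+n-1 in suit s
def pvCanon : Nat → Int → String → List (Int × String)
  | 0, _, _ => []
  | n + 1, r, s => (r, s) :: pvCanon n (r + 1) s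

def pvIsSet (m : List (Int × String)) : Prop :=
  (m.length = 3 ∨ m.length = 4) ∧ ∃ r, ∀ c ∈ m, c.1 = r

def pvIsRun (m : List (Int × String)) : Prop :=
  ∃ r s, (↑m : Multiset (Int × String)) = ↑(pvCanon m.length r s) ∧ 3 ≤ m.length

def pvMeld (m : List (Int × String)) : Prop := pvIsSet m ∨ pvIsRun m

inductive pvDW : Multiset (Int × String) → Int → Prop
  | nil : pvDW 0 0
  | dead (c : Int × String) (h : Multiset (Int × String)) (v : Int) :
      pvDW h v → pvDW (c ::ₘ h) (pvPts c + v)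
  | meld (m : List (Int × String)) (h : Multiset (Int × String)) (v : Int) :
      pvMeld m → pvDW h v → pvDW (↑m + h) v

-- ---- fold-min characterization ----
def pvFoldMin (F : List (Int × String) → Int) (init : Int)
    (xs : List (List (Int × String))) : Int :=
  xs.foldl (fun best r => if F r < best then F r else best) init

theorem pvFoldMin_le_init (F : List (Int × String) → Int) (init : Int)
    (xs : List (List (Int × String))) : pvFoldMin F init xs ≤ init := by
  induction xs generalizing init with
  | nil => simp [pvFoldMin]
  | cons x xs ih =>
      show pvFoldMin F (if F x < init then F x else init) xs ≤ init
      refine le_trans (ih _) ?_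
      split <;> omega

theorem pvFoldMin_le_mem (F : List (Int × String) → Int) (init : Int)
    {xs : List (List (Int × String))} {x : List (Int × String)} (h : x ∈ xs) :
    pvFoldMin F init xs ≤ F x := by
  induction xs generalizing init with
  | nil => simp at h
  | cons y ys ih =>
      rcases List.mem_cons.1 h with rfl | h
      · refine le_trans (pvFoldMin_le_init F _ ys) ?_
        show (if F x < init then F x else init) ≤ F x
        split <;> omega
      · exact ih _ h

theorem pvFoldMin_cases (F : List (Int × String) → Int) (init : Int)
    (xs : List (List (Int × String))) :
    pvFoldMin F init xs = init ∨ ∃ x ∈ xs, pvFoldMin F init xs = F x := by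
  induction xs generalizing init with
  | nil => left; rfl
  | cons x xs ih =>
      have step : pvFoldMin F init (x :: xs) = pvFoldMin F (if F x < init then F x else init) xs := rfl
      rcases ih (if F x < init then F x else init) with h | ⟨y, hy, h⟩
      · rw [step, h]
        split
        · right; exact ⟨x, by simp, rfl⟩
        · left; rfl
      · right; exact ⟨y, by simp [hy], by rw [step, h]⟩

theorem bdrA_cons (first : Int × String) (rest : List (Int × String)) :
    best_deadwood_recursive_py (first :: rest) =
      pvFoldMin best_deadwood_recursive_py
        (pvCardPoints first.1 + best_deadwood_recursive_py rest) (pvBranchesA first rest) := by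
  rw [best_deadwood_recursive_py]
  exact List.foldl_attach (l := pvBranchesA first rest)
    (f := fun best r => if best_deadwood_recursive_py r < best then best_deadwood_recursive_py r else best)
    (b := pvCardPoints first.1 + best_deadwood_recursive_py rest)

theorem solveB_cons (r : Int) (s : String) (rest : List (Int × String)) :
    pvSolveB ((r, s) :: rest) =
      pvFoldMin pvSolveB (pvPointsB r + pvSolveB rest) (pvBranchesB r s rest) := by
  rw [pvSolveB]
  exact List.foldl_attach (l := pvBranchesB r s rest)
    (f := fun best rem => if pvSolveB rem < best then pvSolveB rem else best)
    (b := pvPointsB r + pvSolveB rest)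

-- ---- pvCanon facts ----
theorem pvCanon_length (n : Nat) (r : Int) (s : String) : (pvCanon n r s).length = n := by
  induction n generalizing r with
  | zero => rfl
  | succ n ih => simp [pvCanon, ih]

theorem mem_pvCanon {n : Nat} {r : Int} {s : String} {c : Int × String}
    (h : c ∈ pvCanon n r s) : c.2 = s ∧ r ≤ c.1 ∧ c.1 < r + n := by
  induction n generalizing r with
  | zero => simp [pvCanon] at h
  | succ n ih =>
      rcases List.mem_cons.1 h with rfl | h
      · exact ⟨rfl, le_refl _, by omega⟩
      · obtain ⟨h1, h2, h3⟩ := ih h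
        refine ⟨h1, by omega, by push_cast at h3 ⊢; omega⟩

theorem pvCanon_pairwise_lt (n : Nat) (r : Int) (s : String) :
    (pvCanon n r s).Pairwise (fun a b => a.1 < b.1) := by
  induction n generalizing r with
  | zero => simp [pvCanon]
  | succ n ih =>
      refine List.Pairwise.cons ?_ (ih (r + 1))
      intro b hb
      have := mem_pvCanon hb
      omega

theorem pvCanon_chain (n : Nat) (r : Int) (s : String) :
    (pvCanon n r s).IsChain (fun a b => b.1 = a.1 + 1) := by
  induction n generalizing r with
  | zero => exact List.IsChain.nil
  | succ n ih =>
      cases n with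
      | zero => exact List.IsChain.singleton _
      | succ m => exact List.IsChain.cons_cons rfl (ih (r + 1))

-- a nonempty list with consecutive ranks and a constant suit IS a pvCanon
theorem consec_eq_pvCanon {m : List (Int × String)} {s : String}
    (hch : m.IsChain (fun a b => b.1 = a.1 + 1)) (hs : ∀ c ∈ m, c.2 = s) :
    ∀ r, (∀ c ∈ m.head?, c.1 = r) → m = pvCanon m.length r s := by
  induction m with
  | nil => intro r _; rfl
  | cons x xs ih =>
      intro r hr
      have hx : x.1 = r := hr x rfl
      have hxs : x.2 = s := hs x (by simp)
      have hxeq : x = (r, s) := by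
        cases x; simp at hx hxs; simp [hx, hxs]
      have hch' : xs.IsChain (fun a b => b.1 = a.1 + 1) := hch.of_cons
      have hhead : ∀ c ∈ xs.head?, c.1 = r + 1 := by
        intro c hc
        cases xs with
        | nil => simp at hc
        | cons y ys =>
            simp at hc
            have : y.1 = x.1 + 1 := List.isChain_cons_cons.1 hch |>.1
            rw [← hc]
            omega
      have := ih hch' (fun c hc => hs c (by simp [hc])) (r + 1) hhead
      simp only [List.length_cons, pvCanon, hxeq]
      rw [← this]

-- ---- removal and enumeration lemmas, at the multiset level ----
theorem mem_pvCombos {k : Nat} {xs c : List (Int × String)} (h : c ∈ pvCombos k xs) :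
    c.length = k ∧ c.Sublist xs := by
  induction xs generalizing k c with
  | nil =>
      cases k with
      | zero => simp [pvCombos] at h; simp [h]
      | succ k => simp [pvCombos] at h
  | cons x xs ih =>
      cases k with
      | zero => simp [pvCombos] at h; simp [h]
      | succ k =>
          simp only [pvCombos, List.mem_append, List.mem_map] at h
          rcases h with ⟨c', hc', rfl⟩ | h
          · obtain ⟨h1, h2⟩ := ih hc'
            exact ⟨by simp [h1], List.Sublist.cons₂ x h2⟩
          · obtain ⟨h1, h2⟩ := ih h
            exact ⟨h1, h2.cons x⟩

theorem mem_pvBacktrack {xs cur r : List (Int × String)} (h : r ∈ pvBacktrack xs cur) :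
    ∃ t, t.Sublist xs ∧ r = cur ++ t := by
  induction xs generalizing cur with
  | nil =>
      simp only [pvBacktrack] at h
      split at h <;> simp at h
      exact ⟨[], by simp, by simp [h]⟩
  | cons x xs ih =>
      rw [pvBacktrack] at h
      rcases List.mem_append.1 h with h | h
      · by_cases hcond : (match cur.getLast? with
            | none => true
            | some c => decide (x.1 = c.1 + 1)) = true
        · rw [if_pos hcond] at h
          obtain ⟨t, ht, rfl⟩ := ih h
          exact ⟨x :: t, ht.cons₂ x, by simp⟩
        · rw [if_neg hcond] at h
          simp at h
      · obtain ⟨t, ht, rfl⟩ := ih h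
        exact ⟨t, ht.cons x, rfl⟩

-- List.erase under the coercion, with the ambient Prod BEq instance
theorem pvCoeErase (l : List (Int × String)) (a : Int × String) :
    ((l.erase a : List (Int × String)) : Multiset (Int × String)) =
      (↑l : Multiset (Int × String)).erase a := by
  induction l with
  | nil => simp
  | cons x xs ih =>
      by_cases hx : x = a
      · subst hx
        simp [List.erase_cons_head]
      · rw [List.erase_cons_tail (by simpa using hx)]
        rw [← Multiset.cons_coe, ← Multiset.cons_coe, ih]
        exact (Multiset.erase_cons_tail _ (by simpa using hx)).symm

theorem pvRemoveCards_add : ∀ (t l : List (Int × String)),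
    (↑t : Multiset (Int × String)) ≤ ↑l →
    (↑l : Multiset (Int × String)) = ↑t + ↑(pvRemoveCards l t) := by
  intro t
  induction t with
  | nil => intro l _; simp [pvRemoveCards]
  | cons c cs ih =>
      intro l h
      have hc : c ∈ l := by
        have := Multiset.mem_of_le h (Multiset.mem_cons_self c ↑cs)
        simpa using this
      have hstep : pvRemoveCards l (c :: cs) = pvRemoveCards (l.erase c) cs := by
        show pvRemoveCards ((PySem.List.remove? l c).getD l) cs = _
        rw [PySem.List.remove?_eq_some_erase l c hc]
        rfl
      have hle : (↑cs : Multiset (Int × String)) ≤ ↑(l.erase c) := by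
        have h2 := Multiset.erase_le_erase c h
        rw [← Multiset.cons_coe, Multiset.erase_cons_head, ← pvCoeErase] at h2
        exact h2
      rw [hstep]
      have heq := ih (l.erase c) hle
      calc (↑l : Multiset (Int × String)) = c ::ₘ ↑(l.erase c) := by
            rw [pvCoeErase]
            exact (Multiset.cons_erase (by simpa using hc)).symm
        _ = c ::ₘ (↑cs + ↑(pvRemoveCards (l.erase c) cs)) := by rw [← heq]
        _ = ↑(c :: cs) + ↑(pvRemoveCards (l.erase c) cs) := by
            rw [← Multiset.cons_coe, Multiset.cons_add]

theorem pvTakeCard_some_spec {c : Int × String} {xs ys : List (Int × String)}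
    (h : pvTakeCard c xs = some ys) :
    (↑xs : Multiset (Int × String)) = c ::ₘ ↑ys ∧ ys.Sublist xs := by
  induction xs generalizing ys with
  | nil => simp [pvTakeCard] at h
  | cons x rest ih =>
      simp only [pvTakeCard] at h
      split at h
      · next heq =>
          cases h
          subst heq
          exact ⟨by rw [← Multiset.cons_coe], List.Sublist.cons x (List.Sublist.refl _)⟩
      · rcases Option.map_eq_some_iff.1 h with ⟨ys', hy, rfl⟩
        obtain ⟨h1, h2⟩ := ih hy
        constructor
        · rw [← Multiset.cons_coe, ← Multiset.cons_coe, h1, Multiset.cons_swap]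
        · exact h2.cons₂ x
  
theorem pvTakeCard_mem_some {c : Int × String} {xs : List (Int × String)} (h : c ∈ xs) :
    ∃ ys, pvTakeCard c xs = some ys := by
  induction xs with
  | nil => simp at h
  | cons x rest ih =>
      by_cases hx : x = c
      · exact ⟨rest, by simp [pvTakeCard, hx]⟩
      · rcases List.mem_cons.1 h with rfl | h
        · exact absurd rfl hx
        · obtain ⟨ys, hy⟩ := ih h
          exact ⟨x :: ys, by simp [pvTakeCard, hx, hy]⟩

theorem pvCombos_complete : ∀ (xs : List (Int × String)) (k : Nat) (m : List (Int × String)),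
    (↑m : Multiset (Int × String)) ≤ ↑xs → m.length = k →
    ∃ c ∈ pvCombos k xs, (↑c : Multiset (Int × String)) = ↑m := by
  intro xs
  induction xs with
  | nil =>
      intro k m hle hlen
      have hm : m = [] := by simpa using hle
      subst hm
      obtain rfl : 0 = k := by simpa using hlen
      exact ⟨[], by simp [pvCombos], rfl⟩
  | cons x xs ih =>
      intro k m hle hlen
      cases k with
      | zero =>
          have : m = [] := List.length_eq_zero_iff.1 hlen
          subst this
          exact ⟨[], by simp [pvCombos], rfl⟩
      | succ k =>
          by_cases hx : x ∈ m
          · have hm' : (↑(m.erase x) : Multiset (Int × String)) ≤ ↑xs := by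
              have h2 := Multiset.erase_le_erase x hle
              rw [← Multiset.cons_coe, Multiset.erase_cons_head, ← pvCoeErase] at h2
              exact h2
            have hlen' : (m.erase x).length = k := by
              have := List.length_erase_of_mem hx
              omega
            obtain ⟨c', hc', hcm⟩ := ih k (m.erase x) hm' hlen'
            refine ⟨x :: c', ?_, ?_⟩
            · simp only [pvCombos, List.mem_append, List.mem_map]
              exact Or.inl ⟨c', hc', rfl⟩
            · rw [← Multiset.cons_coe, hcm, pvCoeErase,
                Multiset.cons_erase (by simpa using hx)]
          · have hm' : (↑m : Multiset (Int × String)) ≤ ↑xs := by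
              rw [Multiset.le_iff_count] at hle ⊢
              intro a
              have := hle a
              rw [← Multiset.cons_coe, Multiset.count_cons] at this
              by_cases hax : a = x
              · subst hax
                have : Multiset.count a ↑m = 0 := by
                  rw [Multiset.count_eq_zero]
                  simpa using hx
                omega
              · simpa [hax] using this
            obtain ⟨c, hc, hcm⟩ := ih (k + 1) m hm' hlen
            refine ⟨c, ?_, hcm⟩
            simp only [pvCombos, List.mem_append]
            exact Or.inr hc

theorem pvBacktrack_consec {xs cur r : List (Int × String)}
    (h : r ∈ pvBacktrack xs cur)
    (hcur : cur.IsChain (fun a b => b.1 = a.1 + 1)) :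
    r.IsChain (fun a b => b.1 = a.1 + 1) := by
  induction xs generalizing cur with
  | nil =>
      simp only [pvBacktrack] at h
      split at h <;> simp at h
      subst h; exact hcur
  | cons x xs ih =>
      rw [pvBacktrack] at h
      rcases List.mem_append.1 h with h | h
      · by_cases hcond : (match cur.getLast? with
            | none => true
            | some c => decide (x.1 = c.1 + 1)) = true
        · rw [if_pos hcond] at h
          refine ih h ?_
          rcases hlast : cur.getLast? with _ | c
          · have : cur = [] := List.getLast?_eq_none_iff.1 hlast
            subst this
            exact List.IsChain.singleton x
          · have hrel : x.1 = c.1 + 1 := by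
              rw [hlast] at hcond
              simpa using hcond
            refine List.isChain_append.2 ⟨hcur, List.IsChain.singleton x, ?_⟩
            intro a ha b hb
            rw [hlast] at ha
            simp at ha hb
            subst ha; subst hb
            exact hrel
        · rw [if_neg hcond] at h
          simp at h
      · exact ih h hcur

theorem pvBacktrack_complete : ∀ (xs cur t : List (Int × String)),
    t.Sublist xs → (cur ++ t).IsChain (fun a b => b.1 = a.1 + 1) →
    3 ≤ (cur ++ t).length → (cur ++ t) ∈ pvBacktrack xs cur := by
  intro xs
  induction xs with
  | nil =>
      intro cur t hsub hch hlen
      have : t = [] := List.sublist_nil.1 hsub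
      subst this
      simp only [pvBacktrack]
      rw [if_pos (by simpa using hlen)]
      simp
  | cons x xs ih =>
      intro cur t hsub hch hlen
      rw [pvBacktrack]
      rcases List.sublist_cons_iff.1 hsub with hsub' | ⟨t', rfl, hsub'⟩
      · refine List.mem_append.2 (Or.inr ?_)
        exact ih cur t hsub' hch hlen
      · refine List.mem_append.2 (Or.inl ?_)
        have hcond : (match cur.getLast? with
            | none => true
            | some c => decide (x.1 = c.1 + 1)) = true := by
          rcases hlast : cur.getLast? with _ | c
          · rfl
          · have := (List.isChain_append.1 hch).2.2
            have hrel := this c (by rw [hlast]; rfl) x (by rfl)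
            simpa using hrel
        rw [if_pos hcond]
        have := ih (cur ++ [x]) t' hsub' (by simpa using hch) (by simp at hlen ⊢; omega)
        simpa using this

theorem pvPickRank_sound : ∀ (xs : List (Int × String)) (k : Nat) (r : Int)
    (rem : List (Int × String)), rem ∈ pvPickRank k r xs →
    ∃ ch : List (Int × String), ch.length = k ∧ (∀ c ∈ ch, c.1 = r) ∧
      (↑xs : Multiset (Int × String)) = ↑ch + ↑rem ∧ rem.Sublist xs := by
  intro xs
  induction xs with
  | nil =>
      intro k r rem h
      cases k with
      | zero =>
          simp [pvPickRank] at h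
          subst h
          exact ⟨[], rfl, by simp, by simp, by simp⟩
      | succ k => simp [pvPickRank] at h
  | cons x rest ih =>
      intro k r rem h
      cases k with
      | zero =>
          simp [pvPickRank] at h
          subst h
          exact ⟨[], rfl, by simp, by simp, List.Sublist.refl _⟩
      | succ k =>
          rcases List.mem_append.1 h with h | h
          · split at h
            · next hxr =>
                obtain ⟨ch, hl, hrk, heq, hsub⟩ := ih k r rem h
                refine ⟨x :: ch, by simp [hl], ?_, ?_, hsub.cons x⟩
                · intro c hc
                  rcases List.mem_cons.1 hc with rfl | hc
                  · exact hxr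
                  · exact hrk c hc
                · rw [← Multiset.cons_coe, ← Multiset.cons_coe, heq, Multiset.cons_add]
            · simp at h
          · obtain ⟨rem', h', rfl⟩ := List.mem_map.1 h
            obtain ⟨ch, hl, hrk, heq, hsub⟩ := ih (k + 1) r rem' h'
            refine ⟨ch, hl, hrk, ?_, hsub.cons₂ x⟩
            rw [← Multiset.cons_coe, ← Multiset.cons_coe, heq, Multiset.add_cons]

theorem pvPickRank_complete : ∀ (xs : List (Int × String)) (k : Nat) (r : Int)
    (ch : List (Int × String)) (h' : Multiset (Int × String)),
    (↑xs : Multiset (Int × String)) = ↑ch + h' → ch.length = k → (∀ c ∈ ch, c.1 = r) →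
    ∃ rem ∈ pvPickRank k r xs, (↑rem : Multiset (Int × String)) = h' := by
  intro xs
  induction xs with
  | nil =>
      intro k r ch h' heq hlen hrk
      have hzero : (↑ch : Multiset (Int × String)) + h' = 0 := by simpa using heq.symm
      have hch : ch = [] := by
        have h1 : (↑ch : Multiset (Int × String)) ≤ ↑ch + h' := le_add_right le_rfl
        rw [hzero] at h1
        simpa using Multiset.le_zero.1 h1
      have hh' : h' = 0 := by
        have h1 : h' ≤ ↑ch + h' := le_add_left le_rfl
        rw [hzero] at h1
        exact Multiset.le_zero.1 h1
      subst hch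
      cases hlen
      exact ⟨[], by simp [pvPickRank], by simp [hh']⟩
  | cons x rest ih =>
      intro k r ch h' heq hlen hrk
      cases k with
      | zero =>
          have hch : ch = [] := List.length_eq_zero_iff.1 hlen
          subst hch
          refine ⟨x :: rest, by simp [pvPickRank], ?_⟩
          simpa using heq
      | succ k =>
          by_cases hx : x ∈ ch
          · have hxr : x.1 = r := hrk x hx
            have hcons : (↑ch : Multiset (Int × String)) = x ::ₘ ↑(ch.erase x) := by
              rw [pvCoeErase]
              exact (Multiset.cons_erase (by simpa using hx)).symm
            have heq' : (↑rest : Multiset (Int × String)) = ↑(ch.erase x) + h' := by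
              have : (x ::ₘ ↑rest : Multiset (Int × String)) = x ::ₘ (↑(ch.erase x) + h') := by
                rw [← Multiset.cons_add, ← hcons, ← heq, Multiset.cons_coe]
              exact (Multiset.cons_inj_right x).1 this
            obtain ⟨rem, hmem, hrem⟩ := ih k r (ch.erase x) h' heq'
              (by have := List.length_erase_of_mem hx; omega)
              (fun c hc => hrk c (List.mem_of_mem_erase hc))
            refine ⟨rem, ?_, hrem⟩
            refine List.mem_append.2 (Or.inl ?_)
            rw [if_pos hxr]
            exact hmem
          · have hxh : x ∈ h' := by
              have hxm : x ∈ (↑ch + h' : Multiset (Int × String)) := by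
                rw [← heq, ← Multiset.cons_coe]
                exact Multiset.mem_cons_self x ↑rest
              rcases Multiset.mem_add.1 hxm with h | h
              · exact absurd (by simpa using h) hx
              · exact h
            have heq' : (↑rest : Multiset (Int × String)) = ↑ch + h'.erase x := by
              have : (x ::ₘ ↑rest : Multiset (Int × String)) = x ::ₘ (↑ch + h'.erase x) := by
                rw [← Multiset.add_cons, Multiset.cons_erase hxh, ← heq, Multiset.cons_coe]
              exact (Multiset.cons_inj_right x).1 this
            obtain ⟨rem', hmem, hrem⟩ := ih (k + 1) r ch (h'.erase x) heq' hlen hrk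
            refine ⟨x :: rem', ?_, ?_⟩
            · refine List.mem_append.2 (Or.inr ?_)
              exact List.mem_map.2 ⟨rem', hmem, rfl⟩
            · rw [← Multiset.cons_coe, hrem, Multiset.cons_erase hxh]

theorem pvChain_sound : ∀ (n : Nat) (xs : List (Int × String)), xs.length ≤ n →
    ∀ (s : String) (nxt : Int) (len : Nat) (r' : List (Int × String)),
    r' ∈ pvChain s xs nxt len →
    ∃ j, 1 ≤ j ∧ 3 ≤ len + j ∧
      (↑xs : Multiset (Int × String)) = ↑(pvCanon j nxt s) + ↑r' ∧ r'.Sublist xs := by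
  intro n
  induction n with
  | zero =>
      intro xs hn s nxt len r' h
      rw [pvChain] at h
      split at h
      · simp at h
      · next rem2 htake =>
          have := pvTakeCard_length htake
          omega
  | succ n ih =>
      intro xs hn s nxt len r' h
      rw [pvChain] at h
      split at h
      · simp at h
      · next rem2 htake =>
          obtain ⟨hspec, hsub2⟩ := pvTakeCard_some_spec htake
          have hlen2 := pvTakeCard_length htake
          rcases List.mem_append.1 h with h | h
          · split at h <;> simp at h
            subst h
            refine ⟨1, le_rfl, by omega, ?_, hsub2⟩
            simpa [pvCanon] using hspec
          · obtain ⟨j, hj1, hj3, heq, hsub⟩ := ih rem2 (by omega) s (nxt + 1) (len + 1) r' h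
            refine ⟨j + 1, by omega, by omega, ?_, hsub.trans hsub2⟩
            rw [hspec, heq, pvCanon]
            rw [← Multiset.cons_coe, Multiset.cons_add]

theorem pvChain_complete : ∀ (j : Nat) (xs : List (Int × String)) (s : String)
    (nxt : Int) (len : Nat) (h' : Multiset (Int × String)),
    (↑xs : Multiset (Int × String)) = ↑(pvCanon j nxt s) + h' → 1 ≤ j → 3 ≤ len + j →
    ∃ rem ∈ pvChain s xs nxt len, (↑rem : Multiset (Int × String)) = h' := by
  intro j
  induction j with
  | zero => intro xs s nxt len h' _ h1 _; omega
  | succ j ih =>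
      intro xs s nxt len h' heq _ h3
      have hmem : (nxt, s) ∈ xs := by
        have : (nxt, s) ∈ (↑xs : Multiset (Int × String)) := by
          rw [heq]
          exact Multiset.mem_add.2 (Or.inl (by simp [pvCanon]))
        simpa using this
      obtain ⟨xs2, htake⟩ := pvTakeCard_mem_some hmem
      obtain ⟨hspec, _⟩ := pvTakeCard_some_spec htake
      have heq2 : (↑xs2 : Multiset (Int × String)) = ↑(pvCanon j (nxt + 1) s) + h' := by
        have : ((nxt, s) ::ₘ ↑xs2 : Multiset (Int × String)) =
            (nxt, s) ::ₘ (↑(pvCanon j (nxt + 1) s) + h') := by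
          rw [← hspec, heq, pvCanon, ← Multiset.cons_coe, Multiset.cons_add]
        exact (Multiset.cons_inj_right _).1 this
      have hunfold : pvChain s xs nxt len =
          (if 3 ≤ len + 1 then [xs2] else []) ++ pvChain s xs2 (nxt + 1) (len + 1) := by
        rw [pvChain, htake]
      cases j with
      | zero =>
          refine ⟨xs2, ?_, by simpa [pvCanon] using heq2⟩
          rw [hunfold, if_pos (by omega)]
          simp
      | succ m =>
          obtain ⟨rem, hmem2, hrem⟩ := ih xs2 s (nxt + 1) (len + 1) h' heq2 (by omega) (by omega)
          refine ⟨rem, ?_, hrem⟩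
          rw [hunfold]
          exact List.mem_append.2 (Or.inr hmem2)

theorem pvChain_sublist {s : String} {xs r' : List (Int × String)} {nxt : Int} {len : Nat}
    (h : r' ∈ pvChain s xs nxt len) : r'.Sublist xs := by
  obtain ⟨j, _, _, _, hs⟩ := pvChain_sound xs.length xs le_rfl s nxt len r' h
  exact hs

-- ---- melds and the deadwood relation ----
theorem pvMeld_ne_nil {m : List (Int × String)} (h : pvMeld m) : m ≠ [] := by
  rcases h with ⟨hl, _⟩ | ⟨_, _, _, hl⟩
  · intro hm; subst hm; simp at hl
  · intro hm; subst hm; simp at hl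

theorem pvDW_zero_aux : ∀ {h0 : Multiset (Int × String)} {v : Int},
    pvDW h0 v → h0 = 0 → v = 0 := by
  intro h0 v hd
  cases hd with
  | nil => intro _; rfl
  | dead c h v _ =>
      intro heq
      exact absurd heq (Multiset.cons_ne_zero)
  | meld m h v hm _ =>
      intro heq
      have hle : (↑m : Multiset (Int × String)) ≤ ↑m + h := le_add_right le_rfl
      rw [heq] at hle
      have : (↑m : Multiset (Int × String)) = 0 := Multiset.le_zero.1 hle
      exact absurd (by simpa using this) (pvMeld_ne_nil hm)

theorem pvDW_exchange : ∀ {h : Multiset (Int × String)} {v : Int}, pvDW h v →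
    ∀ c, c ∈ h →
    (∃ h' v', h = c ::ₘ h' ∧ v = pvPts c + v' ∧ pvDW h' v') ∨
    (∃ (m : List (Int × String)) (h' : Multiset (Int × String)), pvMeld m ∧ c ∈ m ∧ h = ↑m + h' ∧ pvDW h' v) := by
  intro h v hd
  induction hd with
  | nil => intro c hc; simp at hc
  | dead c' h0 v0 hd0 ih =>
      intro c hc
      rcases Multiset.mem_cons.1 hc with rfl | hc
      · exact Or.inl ⟨h0, v0, rfl, rfl, hd0⟩
      · rcases ih c hc with ⟨h1, v1, heq, hv, hd1⟩ | ⟨m, h1, hm, hcm, heq, hd1⟩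
        · refine Or.inl ⟨c' ::ₘ h1, pvPts c' + v1, ?_, by omega, pvDW.dead c' h1 v1 hd1⟩
          rw [heq, Multiset.cons_swap]
        · refine Or.inr ⟨m, c' ::ₘ h1, hm, hcm, ?_, pvDW.dead c' h1 v0 hd1⟩
          rw [heq, Multiset.add_cons]
  | meld m h0 v0 hm hd0 ih =>
      intro c hc
      rcases Multiset.mem_add.1 hc with hcm | hc0
      · exact Or.inr ⟨m, h0, hm, by simpa using hcm, rfl, hd0⟩
      · rcases ih c hc0 with ⟨h1, v1, heq, hv, hd1⟩ | ⟨m2, h1, hm2, hcm2, heq, hd1⟩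
        · refine Or.inl ⟨↑m + h1, v1, ?_, hv, pvDW.meld m h1 v1 hm hd1⟩
          rw [heq, Multiset.add_cons]
        · refine Or.inr ⟨m2, ↑m + h1, hm2, hcm2, ?_, pvDW.meld m h1 v0 hm hd1⟩
          rw [heq]
          rw [← add_assoc, ← add_assoc, add_comm (↑m : Multiset (Int × String)) (↑m2 : Multiset (Int × String))]

-- ---- A: soundness and completeness of the branch enumeration ----
theorem bdrA_nil : best_deadwood_recursive_py [] = 0 := by
  rw [best_deadwood_recursive_py]

theorem pvFilterRank_coe (first : Int × String) (l : List (Int × String)) :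
    (↑(l.filter (fun c => decide (c.1 = first.1))) : Multiset (Int × String)) =
      Multiset.filter (fun c => c.1 = first.1) ↑l := by
  simp [Multiset.filter_coe]

theorem pvFilterSuit_coe (first : Int × String) (l : List (Int × String)) :
    (↑(l.filter (fun c => decide (c.2 = first.2))) : Multiset (Int × String)) =
      Multiset.filter (fun c => c.2 = first.2) ↑l := by
  simp [Multiset.filter_coe]

theorem pvBranchesA_sound {first : Int × String} {rest rem : List (Int × String)}
    (h : rem ∈ pvBranchesA first rest) :
    ∃ m, pvMeld m ∧ (↑(first :: rest) : Multiset (Int × String)) = ↑m + ↑rem := by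
  have hcombo : ∀ k, 3 ≤ k → k ≤ 4 →
      ∀ c ∈ pvCombos k ((first :: rest).filter (fun c => decide (c.1 = first.1))),
      ∃ m, pvMeld m ∧
        (↑(first :: rest) : Multiset (Int × String)) = ↑m + ↑(pvRemoveCards (first :: rest) c) := by
    intro k hk3 hk4 c hc
    obtain ⟨hlen, hsub⟩ := mem_pvCombos hc
    have hcl : c.Sublist (first :: rest) := hsub.trans (List.filter_sublist)
    have hle : (↑c : Multiset (Int × String)) ≤ ↑(first :: rest) :=
      Multiset.coe_le.2 hcl.subperm
    refine ⟨c, Or.inl ⟨by omega, first.1, ?_⟩, pvRemoveCards_add c _ hle⟩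
    intro a ha
    have := List.mem_filter.1 (hsub.subset ha)
    simpa using this.2
  rw [pvBranchesA] at h
  rcases List.mem_append.1 h with h12 | h
  swap
  case _ =>
    obtain ⟨run, hrun, rfl⟩ := List.mem_map.1 h
    obtain ⟨hrun1, hrun2⟩ := List.mem_filter.1 hrun
    rw [pvFindAllRuns] at hrun1
    split at hrun1
    · simp at hrun1
    · obtain ⟨hbt, hlen3⟩ := List.mem_filter.1 hrun1
      have hlen3 : 3 ≤ run.length := by simpa using hlen3
      obtain ⟨t, hsub, hteq⟩ := mem_pvBacktrack hbt
      have hteq : run = t := by simpa using hteq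
      subst hteq
      have hch : run.IsChain (fun a b => b.1 = a.1 + 1) :=
        pvBacktrack_consec hbt List.IsChain.nil
      have hsuits : ∀ c ∈ run, c.2 = first.2 := by
        intro c hcr
        have hmem : c ∈ PySem.List.sorted
            ((first :: rest).filter (fun c => decide (c.2 = first.2))) (fun c => c.1) false :=
          hsub.subset hcr
        have : c ∈ (first :: rest).filter (fun c => decide (c.2 = first.2)) :=
          (PySem.List.mem_sorted _ _ _ _).1 hmem
        simpa using (List.mem_filter.1 this).2
      rcases run with _ | ⟨y, run'⟩
      · simp at hlen3
      · have hcanon := consec_eq_pvCanon hch hsuits y.1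
          (by intro c hc; simp at hc; rw [← hc])
        have hle : (↑(y :: run') : Multiset (Int × String)) ≤ ↑(first :: rest) := by
          have hle1 : (↑(y :: run') : Multiset (Int × String)) ≤
              ↑(PySem.List.sorted ((first :: rest).filter (fun c => decide (c.2 = first.2)))
                (fun c => c.1) false) := Multiset.coe_le.2 hsub.subperm
          have hpe : (↑(PySem.List.sorted
              ((first :: rest).filter (fun c => decide (c.2 = first.2))) (fun c => c.1) false) :
              Multiset (Int × String)) =
              ↑((first :: rest).filter (fun c => decide (c.2 = first.2))) :=
            Multiset.coe_eq_coe.2 (PySem.List.sorted_perm _ _ _)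
          rw [hpe] at hle1
          exact le_trans hle1 (Multiset.coe_le.2 (List.filter_sublist).subperm)
        exact ⟨y :: run', Or.inr ⟨y.1, first.2, by rw [← hcanon], hlen3⟩,
          pvRemoveCards_add (y :: run') _ hle⟩
  rcases List.mem_append.1 h12 with h | h
  · split at h
    · obtain ⟨c, hc, rfl⟩ := List.mem_map.1 h
      exact hcombo 3 (by omega) (by omega) c hc
    · simp at h
  · split at h
    · obtain ⟨c, hc, rfl⟩ := List.mem_map.1 h
      exact hcombo 4 (by omega) (by omega) c hc
    · simp at h

theorem pvBranchesA_complete {first : Int × String} {rest m : List (Int × String)}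
    {h' : Multiset (Int × String)} (hm : pvMeld m) (hfm : first ∈ m)
    (heq : (↑(first :: rest) : Multiset (Int × String)) = ↑m + h') :
    ∃ rem ∈ pvBranchesA first rest, (↑rem : Multiset (Int × String)) = h' := by
  have hle : (↑m : Multiset (Int × String)) ≤ ↑(first :: rest) := by
    rw [heq]; exact le_add_right le_rfl
  rcases hm with ⟨hk, r0, hr⟩ | ⟨r0, s0, hcanon, hlen3⟩
  · -- set meld
    have hmle : (↑m : Multiset (Int × String)) ≤
        ↑((first :: rest).filter (fun c => decide (c.1 = first.1))) := by
      rw [pvFilterRank_coe]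
      refine Multiset.le_filter.2 ⟨hle, ?_⟩
      intro a ha
      have ham : a ∈ m := by simpa using ha
      rw [hr a ham, ← hr first hfm]
    have hcard : m.length ≤ ((first :: rest).filter (fun c => decide (c.1 = first.1))).length := by
      have := Multiset.card_le_card hmle
      simpa using this
    obtain ⟨c, hc, hcm⟩ := pvCombos_complete _ m.length m hmle rfl
    have hcle : (↑c : Multiset (Int × String)) ≤ ↑(first :: rest) := by rw [hcm]; exact hle
    have hval := pvRemoveCards_add c _ hcle
    refine ⟨pvRemoveCards (first :: rest) c, ?_, ?_⟩
    · rw [pvBranchesA]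
      rcases hk with h3 | h4
      · refine List.mem_append.2 (Or.inl (List.mem_append.2 (Or.inl ?_)))
        rw [if_pos (by omega)]
        rw [h3] at hc
        exact List.mem_map.2 ⟨c, hc, rfl⟩
      · refine List.mem_append.2 (Or.inl (List.mem_append.2 (Or.inr ?_)))
        rw [if_pos (by omega)]
        rw [h4] at hc
        exact List.mem_map.2 ⟨c, hc, rfl⟩
    · have : (↑m : Multiset (Int × String)) + h' = ↑m + ↑(pvRemoveCards (first :: rest) c) := by
        rw [← heq, hval, hcm]
      exact (Multiset.add_right_inj.1 this).symm
  · -- run meld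
    have hs0 : first.2 = s0 := by
      have : first ∈ (↑m : Multiset (Int × String)) := by simpa using hfm
      rw [hcanon] at this
      exact (mem_pvCanon (by simpa using this)).1
    have hmle : (↑m : Multiset (Int × String)) ≤
        ↑((first :: rest).filter (fun c => decide (c.2 = first.2))) := by
      rw [pvFilterSuit_coe]
      refine Multiset.le_filter.2 ⟨hle, ?_⟩
      intro a ha
      have : a ∈ (↑(pvCanon m.length r0 s0) : Multiset (Int × String)) := by
        rw [← hcanon]; simpa using ha
      rw [(mem_pvCanon (by simpa using this)).1, hs0]
    have hcard : m.length ≤ ((first :: rest).filter (fun c => decide (c.2 = first.2))).length := by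
      have := Multiset.card_le_card hmle
      simpa using this
    have hpe : (↑(PySem.List.sorted
        ((first :: rest).filter (fun c => decide (c.2 = first.2))) (fun c => c.1) false) :
        Multiset (Int × String)) =
        ↑((first :: rest).filter (fun c => decide (c.2 = first.2))) :=
      Multiset.coe_eq_coe.2 (PySem.List.sorted_perm _ _ _)
    have hcle : (↑(pvCanon m.length r0 s0) : Multiset (Int × String)) ≤
        ↑(PySem.List.sorted ((first :: rest).filter (fun c => decide (c.2 = first.2)))
          (fun c => c.1) false) := by
      rw [hpe, ← hcanon]
      exact hmle
    obtain ⟨t, hperm, hsub⟩ := Multiset.coe_le.1 hcle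
    have ht : t = pvCanon m.length r0 s0 := by
      have h1 : PySem.List.sorted t (fun c => c.1) false = t :=
        PySem.List.sorted_eq_self_of_pairwise _ _
          ((PySem.List.sorted_pairwise _ _).sublist hsub)
      have h2 : PySem.List.sorted t (fun c => c.1) false = pvCanon m.length r0 s0 :=
        PySem.List.sorted_eq_of_perm_of_pairwise_lt _ _ _ hperm.symm
          (pvCanon_pairwise_lt _ _ _)
      rw [← h1, h2]
    subst ht
    have hbt : pvCanon m.length r0 s0 ∈ pvBacktrack
        (PySem.List.sorted ((first :: rest).filter (fun c => decide (c.2 = first.2)))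
          (fun c => c.1) false) [] := by
      have := pvBacktrack_complete _ [] (pvCanon m.length r0 s0) hsub
        (by simpa using pvCanon_chain m.length r0 s0)
        (by simp [pvCanon_length]; omega)
      simpa using this
    have hfmem : first ∈ pvCanon m.length r0 s0 := by
      have : first ∈ (↑m : Multiset (Int × String)) := by simpa using hfm
      rw [hcanon] at this
      simpa using this
    have hcle2 : (↑(pvCanon m.length r0 s0) : Multiset (Int × String)) ≤ ↑(first :: rest) := by
      rw [← hcanon]; exact hle
    have hval := pvRemoveCards_add _ _ hcle2
    refine ⟨pvRemoveCards (first :: rest) (pvCanon m.length r0 s0), ?_, ?_⟩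
    · rw [pvBranchesA]
      refine List.mem_append.2 (Or.inr ?_)
      refine List.mem_map.2 ⟨pvCanon m.length r0 s0, ?_, rfl⟩
      refine List.mem_filter.2 ⟨?_, by simpa using hfmem⟩
      rw [pvFindAllRuns]
      rw [if_neg (by omega)]
      refine List.mem_filter.2 ⟨hbt, by simp [pvCanon_length]; omega⟩
    · have : (↑m : Multiset (Int × String)) + h' =
          ↑m + ↑(pvRemoveCards (first :: rest) (pvCanon m.length r0 s0)) := by
        rw [← heq, hval, hcanon]
      exact (Multiset.add_right_inj.1 this).symm

theorem pvA_achieves : ∀ (n : Nat) (l : List (Int × String)), l.length ≤ n →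
    pvDW ↑l (best_deadwood_recursive_py l) := by
  intro n
  induction n with
  | zero =>
      intro l hl
      have : l = [] := List.length_eq_zero_iff.1 (by omega)
      subst this
      rw [bdrA_nil]
      exact pvDW.nil
  | succ n ih =>
      intro l hl
      rcases l with _ | ⟨first, rest⟩
      · rw [bdrA_nil]; exact pvDW.nil
      · rw [bdrA_cons]
        rcases pvFoldMin_cases best_deadwood_recursive_py
            (pvCardPoints first.1 + best_deadwood_recursive_py rest)
            (pvBranchesA first rest) with hcase | ⟨rem, hmem, hcase⟩
        · rw [hcase, ← Multiset.cons_coe]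
          exact pvDW.dead first ↑rest (best_deadwood_recursive_py rest)
            (ih rest (by simp at hl; omega))
        · rw [hcase]
          obtain ⟨m, hm, heq⟩ := pvBranchesA_sound hmem
          rw [heq]
          refine pvDW.meld m ↑rem (best_deadwood_recursive_py rem) hm ?_
          have := pvBranchesA_lt first rest rem hmem
          exact ih rem (by simp at this hl; omega)

theorem pvA_min : ∀ (n : Nat) (l : List (Int × String)), l.length ≤ n →
    ∀ v, pvDW ↑l v → best_deadwood_recursive_py l ≤ v := by
  intro n
  induction n with
  | zero =>
      intro l hl v hd
      have : l = [] := List.length_eq_zero_iff.1 (by omega)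
      subst this
      rw [bdrA_nil]
      rw [pvDW_zero_aux hd rfl]
  | succ n ih =>
      intro l hl v hd
      rcases l with _ | ⟨first, rest⟩
      · rw [bdrA_nil, pvDW_zero_aux hd rfl]
      · rw [bdrA_cons]
        have hfmem : first ∈ (↑(first :: rest) : Multiset (Int × String)) := by simp
        rcases pvDW_exchange hd first hfmem with
          ⟨h1, v1, heq, hv, hd1⟩ | ⟨m, h1, hm, hcm, heq, hd1⟩
        · have h1eq : h1 = ↑rest := by
            rw [← Multiset.cons_coe] at heq
            exact ((Multiset.cons_inj_right first).1 heq.symm)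
          subst h1eq
          have hrec := ih rest (by simp at hl; omega) v1 hd1
          refine le_trans (pvFoldMin_le_init _ _ _) ?_
          have hpts : pvPts first = pvCardPoints first.1 := rfl
          omega
        · obtain ⟨rem, hmem, hrem⟩ := pvBranchesA_complete hm hcm heq
          refine le_trans (pvFoldMin_le_mem _ _ hmem) ?_
          refine ih rem ?_ v (by rw [hrem]; exact hd1)
          have := pvBranchesA_lt first rest rem hmem
          simp at this hl
          omega

-- ---- B: soundness and completeness of the branch enumeration ----
theorem solveB_nil : pvSolveB [] = 0 := by rw [pvSolveB]

theorem pvBranchesB_sublist {r : Int} {s : String} {rest rem : List (Int × String)}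
    (h : rem ∈ pvBranchesB r s rest) : rem.Sublist rest := by
  rcases List.mem_append.1 h with h12 | h
  · rcases List.mem_append.1 h12 with h | h
    · obtain ⟨_, _, _, _, hsub⟩ := pvPickRank_sound rest 2 r rem h
      exact hsub
    · obtain ⟨_, _, _, _, hsub⟩ := pvPickRank_sound rest 3 r rem h
      exact hsub
  · exact pvChain_sublist h

theorem pvBranchesB_sound {r : Int} {s : String} {rest rem : List (Int × String)}
    (h : rem ∈ pvBranchesB r s rest) :
    ∃ m, pvMeld m ∧ (↑((r, s) :: rest) : Multiset (Int × String)) = ↑m + ↑rem := by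
  have hpick : ∀ k, k = 2 ∨ k = 3 → rem ∈ pvPickRank k r rest →
      ∃ m, pvMeld m ∧ (↑((r, s) :: rest) : Multiset (Int × String)) = ↑m + ↑rem := by
    intro k hk hmem
    obtain ⟨ch, hlen, hranks, heq, _⟩ := pvPickRank_sound rest k r rem hmem
    refine ⟨(r, s) :: ch, Or.inl ⟨by simp [hlen]; omega, r, ?_⟩, ?_⟩
    · intro c hc
      rcases List.mem_cons.1 hc with rfl | hc
      · rfl
      · exact hranks c hc
    · rw [← Multiset.cons_coe, ← Multiset.cons_coe, heq, Multiset.cons_add]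
  rcases List.mem_append.1 h with h12 | h
  · rcases List.mem_append.1 h12 with h | h
    · exact hpick 2 (Or.inl rfl) h
    · exact hpick 3 (Or.inr rfl) h
  · obtain ⟨j, hj1, hj3, heq, _⟩ := pvChain_sound rest.length rest le_rfl s (r + 1) 1 rem h
    refine ⟨pvCanon (j + 1) r s, Or.inr ⟨r, s, by rw [pvCanon_length], ?_⟩, ?_⟩
    · rw [pvCanon_length]; omega
    · show (↑((r, s) :: rest) : Multiset (Int × String)) =
        ↑((r, s) :: pvCanon j (r + 1) s) + ↑rem
      rw [← Multiset.cons_coe, ← Multiset.cons_coe, heq, Multiset.cons_add]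

theorem pvBranchesB_complete {r : Int} {s : String} {rest m : List (Int × String)}
    {h' : Multiset (Int × String)}
    (hsorted : ((r, s) :: rest).Pairwise (fun a b => a.1 ≤ b.1))
    (hm : pvMeld m) (hfm : (r, s) ∈ m)
    (heq : (↑((r, s) :: rest) : Multiset (Int × String)) = ↑m + h') :
    ∃ rem ∈ pvBranchesB r s rest, (↑rem : Multiset (Int × String)) = h' := by
  rcases hm with ⟨hk, r0, hr⟩ | ⟨r0, s0, hcanon, hlen3⟩
  · -- set meld through (r, s)
    have hr0 : r0 = r := (hr (r, s) hfm).symm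
    have hch : (↑m : Multiset (Int × String)) = (r, s) ::ₘ ↑(m.erase (r, s)) := by
      rw [pvCoeErase]
      exact (Multiset.cons_erase (by simpa using hfm)).symm
    have heq' : (↑rest : Multiset (Int × String)) = ↑(m.erase (r, s)) + h' := by
      have hstep : ((r, s) ::ₘ ↑rest : Multiset (Int × String)) =
          (r, s) ::ₘ (↑(m.erase (r, s)) + h') := by
        rw [← Multiset.cons_add, ← hch, ← heq, Multiset.cons_coe]
      exact (Multiset.cons_inj_right _).1 hstep
    have hlen' : (m.erase (r, s)).length = m.length - 1 := by
      have := List.length_erase_of_mem hfm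
      omega
    obtain ⟨rem, hmem, hrem⟩ := pvPickRank_complete rest (m.length - 1) r (m.erase (r, s)) h'
      heq' hlen' (fun c hc => by rw [hr c (List.mem_of_mem_erase hc), hr0])
    refine ⟨rem, ?_, hrem⟩
    rcases hk with h3 | h4
    · refine List.mem_append.2 (Or.inl (List.mem_append.2 (Or.inl ?_)))
      rw [h3] at hmem
      exact hmem
    · refine List.mem_append.2 (Or.inl (List.mem_append.2 (Or.inr ?_)))
      rw [h4] at hmem
      exact hmem
  · -- run meld through (r, s): since r is minimal, the run starts at (r, s)
    obtain ⟨L', hL'⟩ : ∃ L', m.length = L' + 1 := ⟨m.length - 1, by omega⟩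
    have hfc : (r, s) ∈ pvCanon m.length r0 s0 := by
      have : (r, s) ∈ (↑m : Multiset (Int × String)) := by simpa using hfm
      rw [hcanon] at this
      simpa using this
    have hs0 : s0 = s := ((mem_pvCanon hfc).1).symm
    have hr0le : r0 ≤ r := (mem_pvCanon hfc).2.1
    have hler : r ≤ r0 := by
      -- (r0, s0) is the head of the canon, so it is a card of the hand
      have hhead : (r0, s0) ∈ pvCanon m.length r0 s0 := by
        rw [hL']; simp [pvCanon]
      have hmm : (r0, s0) ∈ (↑m : Multiset (Int × String)) := by
        rw [hcanon]; simpa using hhead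
      have hmemhand : (r0, s0) ∈ (r, s) :: rest := by
        have h2 : (r0, s0) ∈ (↑((r, s) :: rest) : Multiset (Int × String)) := by
          rw [heq]
          exact Multiset.mem_add.2 (Or.inl hmm)
        simpa using h2
      rcases List.mem_cons.1 hmemhand with hh | hh
      · have : r0 = r := by simpa using congrArg Prod.fst hh
        omega
      · have := (List.pairwise_cons.1 hsorted).1 _ hh
        simpa using this
    have hr0 : r0 = r := le_antisymm hr0le hler
    rw [hr0, hs0] at hcanon
    have hsplit : (↑m : Multiset (Int × String)) =
        (r, s) ::ₘ ↑(pvCanon L' (r + 1) s) := by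
      rw [hcanon, hL']
      rw [show pvCanon (L' + 1) r s = (r, s) :: pvCanon L' (r + 1) s from rfl]
      rw [← Multiset.cons_coe]
    have heq' : (↑rest : Multiset (Int × String)) = ↑(pvCanon L' (r + 1) s) + h' := by
      have hstep : ((r, s) ::ₘ ↑rest : Multiset (Int × String)) =
          (r, s) ::ₘ (↑(pvCanon L' (r + 1) s) + h') := by
        rw [← Multiset.cons_add, ← hsplit, ← heq, Multiset.cons_coe]
      exact (Multiset.cons_inj_right _).1 hstep
    obtain ⟨rem, hmem, hrem⟩ := pvChain_complete L' rest s (r + 1) 1 h'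
      heq' (by omega) (by omega)
    exact ⟨rem, List.mem_append.2 (Or.inr hmem), hrem⟩

theorem pvB_achieves : ∀ (n : Nat) (hand : List (Int × String)), hand.length ≤ n →
    pvDW ↑hand (pvSolveB hand) := by
  intro n
  induction n with
  | zero =>
      intro hand hl
      have : hand = [] := List.length_eq_zero_iff.1 (by omega)
      subst this
      rw [solveB_nil]
      exact pvDW.nil
  | succ n ih =>
      intro hand hl
      rcases hand with _ | ⟨⟨r, s⟩, rest⟩
      · rw [solveB_nil]; exact pvDW.nil
      · rw [solveB_cons]
        rcases pvFoldMin_cases pvSolveB (pvPointsB r + pvSolveB rest)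
            (pvBranchesB r s rest) with hcase | ⟨rem, hmem, hcase⟩
        · rw [hcase, ← Multiset.cons_coe]
          exact pvDW.dead (r, s) ↑rest (pvSolveB rest) (ih rest (by simp at hl; omega))
        · rw [hcase]
          obtain ⟨m, hm, heq⟩ := pvBranchesB_sound hmem
          rw [heq]
          refine pvDW.meld m ↑rem (pvSolveB rem) hm ?_
          have := pvBranchesB_lt r s rest rem hmem
          exact ih rem (by simp at this hl; omega)

theorem pvB_min : ∀ (n : Nat) (hand : List (Int × String)), hand.length ≤ n →
    hand.Pairwise (fun a b => a.1 ≤ b.1) →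
    ∀ v, pvDW ↑hand v → pvSolveB hand ≤ v := by
  intro n
  induction n with
  | zero =>
      intro hand hl _ v hd
      have : hand = [] := List.length_eq_zero_iff.1 (by omega)
      subst this
      rw [solveB_nil, pvDW_zero_aux hd rfl]
  | succ n ih =>
      intro hand hl hsorted v hd
      rcases hand with _ | ⟨⟨r, s⟩, rest⟩
      · rw [solveB_nil, pvDW_zero_aux hd rfl]
      · rw [solveB_cons]
        have hfmem : (r, s) ∈ (↑((r, s) :: rest) : Multiset (Int × String)) := by simp
        rcases pvDW_exchange hd (r, s) hfmem with
          ⟨h1, v1, heq, hv, hd1⟩ | ⟨m, h1, hm, hcm, heq, hd1⟩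
        · have h1eq : h1 = ↑rest := by
            rw [← Multiset.cons_coe] at heq
            exact ((Multiset.cons_inj_right _).1 heq.symm)
          subst h1eq
          have hrec := ih rest (by simp at hl; omega) hsorted.of_cons v1 hd1
          refine le_trans (pvFoldMin_le_init _ _ _) ?_
          have hpts : pvPts (r, s) = pvPointsB r := rfl
          omega
        · obtain ⟨rem, hmem, hrem⟩ := pvBranchesB_complete hsorted hm hcm heq
          refine le_trans (pvFoldMin_le_mem _ _ hmem) ?_
          refine ih rem ?_ (hsorted.of_cons.sublist (pvBranchesB_sublist hmem)) v
            (by rw [hrem]; exact hd1)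
          have := pvBranchesB_lt r s rest rem hmem
          simp at this hl
          omega

-- ===== VERDICT (by name: the statement is the Claim_ definition above) =====
theorem best_deadwood_recursive_py_spec : Claim_equal_best_deadwood_recursive_py := by
  intro l _
  show best_deadwood_recursive_py l = best_deadwood_recursive_py_alt l
  unfold best_deadwood_recursive_py_alt
  have hperm : (↑(PySem.List.sorted l (fun c => c.1) false) : Multiset (Int × String)) = ↑l :=
    Multiset.coe_eq_coe.2 (PySem.List.sorted_perm _ _ _)
  apply le_antisymm
  · apply pvA_min l.length l le_rfl
    have := pvB_achieves (PySem.List.sorted l (fun c => c.1) false).length _ le_rfl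
    rwa [hperm] at this
  · apply pvB_min (PySem.List.sorted l (fun c => c.1) false).length _ le_rfl
      (PySem.List.sorted_pairwise _ _)
    rw [hperm]
    exact pvA_achieves l.length l le_rfl
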